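-- pv_equiv track=rewrite | github.com/leah-1ee/coding-test-study | 프로그래머스/1/176963. 추억 점수/추억 점수.py | solution
-- ===== SOURCE A (Python) =====
-- def solution(name, yearning, photos):
--     answer = []
--
--     # {이름: 점수} 저장할 딕셔너리
--     name_dict = {n:num for n, num in zip(name, yearning)}
--
--     # 모든 사진의 점수 계산
--     for photo in photos:
--         score = 0
--
--         for person in photo:
--             # 점수가 존재하는 사람이면
--             if person in name_dict:
--                 # 점수 추가
--                 score += name_dict[person]
--
--         # 사진 점수 기록
--         answer.append(score)
--
--     return answer
-- ===== SOURCE B (Python) =====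
-- def solution(name, yearning, photos):
--     # Build the score table once, then score each photo directly as a
--     # sum of occurrence-count * score products -- no per-person lookups.
--     scores = dict(zip(name, yearning))
--     return [sum(photo.count(n) * s for n, s in scores.items()) for photo in photos]
-- ===== Notes on version B (the rewrite author's own statement) =====
-- stated objective: simpler
-- what changed: Replaces A's append loop with per-person dict lookups by a single comprehension that scores each photo as sum(photo.count(n) * s over the score table's items), trading the inner membership-test-and-lookup loop for direct count products.
import Mathlib
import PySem

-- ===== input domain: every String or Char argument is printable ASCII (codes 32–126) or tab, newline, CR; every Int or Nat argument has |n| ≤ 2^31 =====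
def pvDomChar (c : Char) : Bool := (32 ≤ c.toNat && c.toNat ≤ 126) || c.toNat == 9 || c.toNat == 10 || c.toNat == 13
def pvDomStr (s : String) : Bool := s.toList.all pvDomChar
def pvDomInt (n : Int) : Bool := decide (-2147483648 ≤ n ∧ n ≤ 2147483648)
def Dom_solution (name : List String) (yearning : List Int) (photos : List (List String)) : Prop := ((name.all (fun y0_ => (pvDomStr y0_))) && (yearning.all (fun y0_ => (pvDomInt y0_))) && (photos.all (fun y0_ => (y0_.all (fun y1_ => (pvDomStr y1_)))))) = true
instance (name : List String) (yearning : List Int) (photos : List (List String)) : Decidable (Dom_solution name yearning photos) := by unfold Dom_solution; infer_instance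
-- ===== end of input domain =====

-- B replaces A's append loop with per-person dict lookups by a single comprehension that
-- scores each photo as the sum of count * score products over the table's items; no speed claim.

-- ===== PORT A =====
def solution (name : List String) (yearning : List Int) (photos : List (List String)) : List Int :=
  let nameDict : PySem.Dict String Int :=
    (name.zip yearning).foldl (fun d p => d.insert p.1 p.2) PySem.Dict.empty
  photos.foldl (fun answer photo =>
    answer ++ [photo.foldl (fun score person =>
      match nameDict.get? person with
      | some v => score + v
      | none => score) (0:Int)]) []

-- ===== PORT B =====
def solution_alt (name : List String) (yearning : List Int) (photos : List (List String)) : List Int :=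
  let scores : PySem.Dict String Int := PySem.Dict.ofList (name.zip yearning)
  photos.map (fun photo =>
    (scores.items.map (fun ns => (PySem.List.count photo ns.1 : Int) * ns.2)).sum)

-- ===== PRECONDITION & SPEC =====
def Spec_solution (name : List String) (yearning : List Int) (photos : List (List String)) (out : List Int) : Prop := out = solution_alt name yearning photos
instance (name : List String) (yearning : List Int) (photos : List (List String)) (out : List Int) : Decidable (Spec_solution name yearning photos out) := by unfold Spec_solution; infer_instance

-- ===== CLAIM (what is proved, stated in full; the proofs are below) =====
def Claim_equal_solution : Prop := ∀ (name : List String) (yearning : List Int) (photos : List (List String)), Dom_solution name yearning photos → Spec_solution name yearning photos (solution name yearning photos)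

-- ===== LEMMAS AND PROOFS =====

-- a person's dict value (default 0) as a sum over an assoc list with nodup keys
theorem assoc_getD_sum (l : List (String × Int)) (hnd : (l.map Prod.fst).Nodup) (p : String) :
    (PySem.Dict.mk l).getD p 0 = (l.map (fun kv => if p = kv.1 then kv.2 else 0)).sum := by
  induction l with
  | nil => simp [pysem]
  | cons kv t ih =>
    simp only [List.map_cons] at hnd
    obtain ⟨hne, hnt⟩ := List.nodup_cons.mp hnd
    rw [PySem.Dict.getD_eq_get?_getD, PySem.Dict.get?_mk_cons]
    simp only [List.map_cons, List.sum_cons]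
    by_cases h : p = kv.1
    · have hb : (kv.1 == p) = true := by simp [h]
      rw [hb, if_pos h]
      have hz : (t.map (fun kv' => if p = kv'.1 then kv'.2 else (0:Int))).sum = 0 := by
        apply List.sum_eq_zero
        intro x hx
        obtain ⟨kv', hm, hx'⟩ := List.mem_map.mp hx
        have hpn : p ≠ kv'.1 := by
          intro he
          exact hne (h ▸ he ▸ List.mem_map_of_mem hm)
        rw [if_neg hpn] at hx'
        exact hx'.symm
      simp [hz]
    · have hb : (kv.1 == p) = false := by
        simp only [beq_eq_false_iff_ne, ne_eq]
        exact fun he => h he.symm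
      rw [hb, if_neg h]
      simp only [Bool.false_eq_true, if_false]
      rw [← PySem.Dict.getD_eq_get?_getD, ih hnt]
      simp

theorem getD_eq_items_sum (d : PySem.Dict String Int) (hnd : d.keys.Nodup) (p : String) :
    d.getD p 0 = (d.items.map (fun kv => if p = kv.1 then kv.2 else 0)).sum := by
  obtain ⟨l⟩ := d
  exact assoc_getD_sum l (by simpa [PySem.Dict.keys] using hnd) p

-- Python count as a sum of indicators
theorem count_mul_eq_sum (photo : List String) (k : String) (v : Int) :
    (PySem.List.count photo k : Int) * v
      = (photo.map (fun person => if person = k then v else 0)).sum := by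
  induction photo with
  | nil => simp [PySem.List.count]
  | cons a t ih =>
    by_cases h : a = k <;>
      simp [PySem.List.count, h, add_mul] at ih ⊢ <;> omega

-- sum swap for a double sum of maps
theorem sum_map_sum_swap (l : List String) (m : List (String × Int))
    (f : String → String × Int → Int) :
    (l.map (fun x => (m.map (fun y => f x y)).sum)).sum
      = (m.map (fun y => (l.map (fun x => f x y)).sum)).sum := by
  induction l with
  | nil => simp
  | cons a t ih =>
    simp only [List.map_cons, List.sum_cons, ih]
    rw [← PySem.List.sum_map_add_int]

-- per-photo agreement: A's inner lookup loop equals B's sum of count * score over the items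
theorem photo_score_eq (d : PySem.Dict String Int) (hnd : d.keys.Nodup) (photo : List String) :
    photo.foldl (fun score person =>
      match d.get? person with
      | some v => score + v
      | none => score) (0:Int)
    = (d.items.map (fun ns => (PySem.List.count photo ns.1 : Int) * ns.2)).sum := by
  have hstep : (fun (score : Int) (person : String) =>
      match d.get? person with
      | some v => score + v
      | none => score)
      = fun score person => score + d.getD person 0 := by
    funext score person
    rw [PySem.Dict.getD_eq_get?_getD]
    cases d.get? person <;> simp
  rw [hstep, PySem.List.foldl_add]
  have h1 : photo.map (fun person => d.getD person 0)
      = photo.map (fun person => (d.items.map (fun kv => if person = kv.1 then kv.2 else 0)).sum) :=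
    List.map_congr_left (fun person _ => getD_eq_items_sum d hnd person)
  rw [h1, sum_map_sum_swap photo d.items (fun person kv => if person = kv.1 then kv.2 else 0)]
  have h2 : d.items.map (fun ns => (PySem.List.count photo ns.1 : Int) * ns.2)
      = d.items.map (fun ns => (photo.map (fun person => if person = ns.1 then ns.2 else 0)).sum) :=
    List.map_congr_left fun ns _ => count_mul_eq_sum photo ns.1 ns.2
  rw [h2, zero_add]

-- ===== VERDICT (by name: the statement is the Claim_ definition above) =====
theorem solution_spec : Claim_equal_solution := by
  intro name yearning photos _
  unfold Spec_solution solution solution_alt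
  have hofl : PySem.Dict.ofList (name.zip yearning)
      = (name.zip yearning).foldl (fun d p => d.insert p.1 p.2)
          (PySem.Dict.empty : PySem.Dict String Int) := rfl
  have hnd : ((name.zip yearning).foldl (fun d p => d.insert p.1 p.2)
      (PySem.Dict.empty : PySem.Dict String Int)).keys.Nodup := by
    have := PySem.Dict.nodup_keys_foldl_insert_key (name.zip yearning) Prod.fst
      (fun d p => p.2) (PySem.Dict.empty : PySem.Dict String Int) (by simp [pysem])
    simpa using this
  rw [hofl, PySem.List.foldl_append_singleton_eq_map]
  simp only [List.nil_append]
  exact List.map_congr_left fun photo _ =>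
    photo_score_eq _ hnd photo
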